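-- pv_equiv track=rewrite | github.com/Rashi0411/Python-Codes | series6UsingRecursion.py | series6
-- ===== SOURCE A (Python) =====
-- def prime(n):
--     c = 0
--     for i in range(1,n+1):
--         if n%i == 0:
--             c += 1
--     if c == 2:
--         return True
--     else:
--         return False
--
-- def series6(a,b,c,n):
--     if n == 1:
--         return a
--     elif n == 2:
--         return b
--     elif n == 3:
--         return c
--     elif (prime(n)):
--         return n - series6(a,b,c,n-1)
--     else:
--         return series6(a,b,c,n-1) + series6(a,b,c,n-2) - series6(a,b,c,n-3)
-- ===== SOURCE B (Python) =====
-- def _is_prime(k):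
--     if k < 2:
--         return False
--     d = 2
--     while d * d <= k:
--         if k % d == 0:
--             return False
--         d += 1
--     return True
--
-- def series6(a, b, c, n):
--     if n == 1:
--         return a
--     if n == 2:
--         return b
--     x, y, z = a, b, c
--     for k in range(4, n + 1):
--         x, y, z = y, z, (k - z) if _is_prime(k) else (z + y - x)
--     return z
-- ===== Notes on version B (the rewrite author's own statement) =====
-- stated objective: alternative
-- what changed: B computes the series bottom-up with a loop keeping only the last three terms and a trial-division-to-sqrt(k) primality test, instead of A's three-way recursion with a count-all-divisors primality test.
import Mathlib
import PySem

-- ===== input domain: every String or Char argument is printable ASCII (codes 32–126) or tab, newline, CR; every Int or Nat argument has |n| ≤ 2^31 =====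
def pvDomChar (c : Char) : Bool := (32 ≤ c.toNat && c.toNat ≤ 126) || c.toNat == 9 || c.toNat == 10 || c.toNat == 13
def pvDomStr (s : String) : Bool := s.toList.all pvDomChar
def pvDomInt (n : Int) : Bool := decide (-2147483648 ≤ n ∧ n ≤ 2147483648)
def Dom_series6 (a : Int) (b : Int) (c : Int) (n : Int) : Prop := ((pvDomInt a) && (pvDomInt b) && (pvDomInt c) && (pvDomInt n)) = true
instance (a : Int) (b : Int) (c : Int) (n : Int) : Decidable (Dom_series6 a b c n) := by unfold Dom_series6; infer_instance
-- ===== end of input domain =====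

-- B computes the series bottom-up with a loop keeping only the last three terms and a
-- trial-division-to-√k primality test, instead of A's three-way recursion with a
-- count-all-divisors primality test.

-- ===== PORT A =====
-- prime(n): count the divisors of n among 1..n, return (count == 2)
def primeA (n : Int) : Bool :=
  let c := (PySem.List.pyRange 1 (n+1) 1).foldl
    (fun c i => if PySem.Int.mod n i = 0 then c + 1 else c) (0 : Int)
  if c = 2 then true else false

-- A's recursion, fuel = recursion depth; Python diverges (RecursionError) for n ≤ 0,
-- which Pre_series6 excludes, so fuel n.toNat is always sufficient on the claimed domain.
def series6go (a : Int) (b : Int) (c : Int) : Nat → Int → Int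
  | 0, _ => 0
  | fuel+1, n =>
    if n = 1 then a
    else if n = 2 then b
    else if n = 3 then c
    else if primeA n then n - series6go a b c fuel (n-1)
    else series6go a b c fuel (n-1) + series6go a b c fuel (n-2) - series6go a b c fuel (n-3)

def series6 (a : Int) (b : Int) (c : Int) (n : Int) : Int :=
  series6go a b c n.toNat n

-- ===== PORT B =====
-- _is_prime(k): trial division while d*d <= k; fuel k.toNat bounds the loop count
def primeBgo (k : Int) : Nat → Int → Bool
  | 0, _ => true
  | fuel+1, d =>
    if d * d ≤ k then
      (if PySem.Int.mod k d = 0 then false else primeBgo k fuel (d+1))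
    else true

def isPrimeB (k : Int) : Bool :=
  if k < 2 then false else primeBgo k k.toNat 2

def stepB (s : Int × Int × Int) (k : Int) : Int × Int × Int :=
  (s.2.1, s.2.2, if isPrimeB k then k - s.2.2 else s.2.2 + s.2.1 - s.1)

def series6_alt (a : Int) (b : Int) (c : Int) (n : Int) : Int :=
  if n = 1 then a
  else if n = 2 then b
  else ((PySem.List.pyRange 4 (n+1) 1).foldl stepB (a, b, c)).2.2

-- ===== PRECONDITION & SPEC =====
-- Pre_ excludes n ≤ 0, on which Python A recurses forever past the base cases (RecursionError).
def Pre_series6 (a : Int) (b : Int) (c : Int) (n : Int) : Prop := 1 ≤ n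
instance (a : Int) (b : Int) (c : Int) (n : Int) : Decidable (Pre_series6 a b c n) := by
  unfold Pre_series6; infer_instance
def pvWitness_series6 : Int × Int × Int × Int := (0, 1, 2, 7)

def Spec_series6 (a : Int) (b : Int) (c : Int) (n : Int) (out : Int) : Prop := out = series6_alt a b c n
instance (a : Int) (b : Int) (c : Int) (n : Int) (out : Int) : Decidable (Spec_series6 a b c n out) := by unfold Spec_series6; infer_instance

-- ===== CLAIM (what is proved, stated in full; the proofs are below) =====
def Claim_equal_series6 : Prop := ∀ (a : Int) (b : Int) (c : Int) (n : Int), Dom_series6 a b c n → Pre_series6 a b c n → Spec_series6 a b c n (series6 a b c n)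

-- ===== LEMMAS AND PROOFS =====

-- A's counting fold is countP
theorem foldl_count_eq_countP (n : Int) (l : List Int) (c : Int) :
    l.foldl (fun c i => if PySem.Int.mod n i = 0 then c + 1 else c) c
      = c + l.countP (fun i => decide (PySem.Int.mod n i = 0)) := by
  induction l generalizing c with
  | nil => simp
  | cons x xs ih =>
    by_cases h : PySem.Int.mod n x = 0 <;>
      simp [List.foldl, List.countP_cons, h, ih] <;> ring

-- divisor-count characterisation of primality (over 1..m encoded as range m shifted by 1)
theorem countP_divisors_eq_two_iff (m : Nat) (hm : 1 ≤ m) :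
    ((List.range m).countP (fun k => decide ((k+1) ∣ m)) = 2) ↔ m.Prime := by
  rcases Nat.lt_or_ge m 2 with h2 | h2
  · have : m = 1 := by omega
    subst this; decide
  · obtain ⟨s, rfl⟩ : ∃ s, m = s + 2 := ⟨m - 2, by omega⟩
    set p : Nat → Bool := fun k => decide ((k+1) ∣ (s+2)) with hp
    have hsplit : (List.range (s+2)).countP p
        = (List.range s).countP (p ∘ Nat.succ) + 2 := by
      rw [List.range_succ, List.countP_append, List.range_succ_eq_map, List.countP_cons,
          List.countP_map]
      have h0 : p 0 = true := by simp [hp]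
      have h1 : p (s+1) = true := by simp [hp]
      simp only [h0, h1, if_true, List.countP_cons, List.countP_nil]
    have hzero : ((List.range s).countP (p ∘ Nat.succ) = 0)
        ↔ ∀ d : Nat, 2 ≤ d → d < s + 2 → ¬ d ∣ (s+2) := by
      rw [List.countP_eq_zero]
      constructor
      · intro h d hd2 hds hdvd
        refine h (d - 2) (List.mem_range.mpr (by omega)) ?_
        simp only [Function.comp_apply, hp, Nat.succ_eq_add_one, decide_eq_true_eq]
        have hd' : d - 2 + 1 + 1 = d := by omega
        rw [hd']; exact hdvd
      · intro h k hk hcontra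
        simp only [List.mem_range] at hk
        simp only [Function.comp_apply, hp, Nat.succ_eq_add_one, decide_eq_true_eq] at hcontra
        exact h (k + 2) (by omega) (by omega) hcontra
    rw [hsplit, Nat.prime_def_lt']
    constructor
    · intro h
      exact ⟨by omega, fun d hd2 hds => hzero.mp (by omega) d hd2 hds⟩
    · intro ⟨_, h⟩
      have := hzero.mpr h
      omega

-- primeA decides Nat primality on n ≥ 1
theorem primeA_iff (n : Int) (hn : 1 ≤ n) : primeA n = true ↔ n.toNat.Prime := by
  unfold primeA
  have hm : ((n.toNat : Int)) = n := by omega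
  rw [PySem.List.pyRange_one, foldl_count_eq_countP, List.countP_map]
  have hcongr : List.countP ((fun i => decide (PySem.Int.mod n i = 0)) ∘ (fun k : Nat => 1 + (k:Int)))
      (List.range ((n + 1 - 1).toNat))
      = List.countP (fun k => decide ((k+1) ∣ n.toNat)) (List.range n.toNat) := by
    have he : (n + 1 - 1).toNat = n.toNat := by omega
    rw [he]
    apply List.countP_congr
    intro k _
    simp only [Function.comp_apply, decide_eq_true_eq]
    rw [PySem.Int.mod_eq_zero_iff_dvd]
    have hcast : ((k+1 : Nat) : Int) = 1 + (k:Int) := by push_cast; ring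
    constructor
    · intro hd
      have h2 : ((k+1 : Nat) : Int) ∣ ((n.toNat : Int)) := by rw [hm, hcast]; exact hd
      exact_mod_cast h2
    · intro hd
      have h2 : ((k+1 : Nat) : Int) ∣ ((n.toNat : Int)) := by exact_mod_cast hd
      rw [hm, hcast] at h2; exact h2
  rw [hcongr]
  rw [← countP_divisors_eq_two_iff n.toNat (by omega)]
  constructor
  · intro h
    by_cases hc : (0 : Int) + (List.countP (fun k => decide ((k+1) ∣ n.toNat)) (List.range n.toNat) : Nat) = 2
    · omega
    · rw [if_neg hc] at h; exact absurd h (by simp)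
  · intro h
    rw [if_pos (by omega)]

-- primeBgo with enough fuel decides "no divisor e with d ≤ e and e*e ≤ k"
theorem primeBgo_iff (k : Int) (fuel : Nat) (d : Int) (hd : 2 ≤ d)
    (hfuel : k < (d + fuel) * (d + fuel)) :
    primeBgo k fuel d = true ↔ ∀ e : Int, d ≤ e → e * e ≤ k → ¬ e ∣ k := by
  induction fuel generalizing d with
  | zero =>
    constructor
    · intro _ e he hee _
      have hf0 : k < d * d := by simpa using hfuel
      nlinarith
    · intro _; rfl
  | succ f ih =>
    show (if d * d ≤ k then
        (if PySem.Int.mod k d = 0 then false else primeBgo k f (d+1))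
      else true) = true ↔ _
    by_cases hdk : d * d ≤ k
    · rw [if_pos hdk]
      by_cases hmod : PySem.Int.mod k d = 0
      · rw [if_pos hmod]
        have hdvd : d ∣ k := (PySem.Int.mod_eq_zero_iff_dvd k d).mp hmod
        constructor
        · intro h; exact absurd h (by simp)
        · intro hall; exact absurd hdvd (hall d le_rfl hdk)
      · rw [if_neg hmod]
        have hndvd : ¬ d ∣ k := fun h => hmod ((PySem.Int.mod_eq_zero_iff_dvd k d).mpr h)
        have hfe : k < (d + 1 + (f:Int)) * (d + 1 + (f:Int)) := by
          have : (d + 1 + (f:Int)) = d + ((f:Nat)+1 : Nat) := by push_cast; ring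
          rw [this]; exact_mod_cast hfuel
        rw [ih (d+1) (by omega) hfe]
        constructor
        · intro h e he hee
          rcases eq_or_lt_of_le he with rfl | hlt
          · exact hndvd
          · exact h e (by omega) hee
        · intro h e he hee
          exact h e (by omega) hee
    · rw [if_neg hdk]
      simp only [true_iff]
      intro e he hee _
      nlinarith

-- isPrimeB decides Nat primality on k ≥ 1
theorem isPrimeB_iff (k : Int) (hk : 1 ≤ k) : isPrimeB k = true ↔ k.toNat.Prime := by
  unfold isPrimeB
  by_cases h2 : k < 2
  · have : k = 1 := by omega
    subst this
    simp [Nat.not_prime_one]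
  · rw [if_neg h2]
    have hk2 : 2 ≤ k := by omega
    have hm : ((k.toNat : Int)) = k := by omega
    rw [primeBgo_iff k k.toNat 2 le_rfl (by rw [hm]; nlinarith)]
    rw [Nat.prime_def_le_sqrt]
    constructor
    · intro h
      refine ⟨by omega, fun e he2 hes hdvd => ?_⟩
      have hee : (e : Int) * (e : Int) ≤ k := by
        have : e * e ≤ k.toNat := Nat.le_sqrt.mp hes
        rw [← hm]; exact_mod_cast this
      exact (h e (by exact_mod_cast he2) hee) (by rw [← hm]; exact_mod_cast hdvd)
    · intro ⟨_, h⟩ e he2 hee hdvd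
      have he0 : (0:Int) ≤ e := by omega
      have heq : ((e.toNat : Int)) = e := by omega
      refine h e.toNat (by omega) ?_ ?_
      · apply Nat.le_sqrt.mpr
        have : ((e.toNat * e.toNat : Nat) : Int) ≤ ((k.toNat : Int)) := by
          push_cast; rw [heq, hm]; exact hee
        exact_mod_cast this
      · have : ((e.toNat : Int)) ∣ ((k.toNat : Int)) := by rw [heq, hm]; exact hdvd
        exact_mod_cast this

theorem primeA_eq_isPrimeB (n : Int) (hn : 1 ≤ n) : primeA n = isPrimeB n := by
  rw [Bool.eq_iff_iff, primeA_iff n hn, isPrimeB_iff n hn]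

-- fuel irrelevance for A's recursion
theorem series6go_fuel (a b c : Int) (f1 f2 : Nat) (n : Int) (hn : 1 ≤ n)
    (h1 : n.toNat ≤ f1) (h2 : n.toNat ≤ f2) :
    series6go a b c f1 n = series6go a b c f2 n := by
  induction f1 generalizing f2 n with
  | zero => exact absurd h1 (by omega)
  | succ f ih =>
    obtain ⟨g, rfl⟩ : ∃ g, f2 = g + 1 := ⟨f2 - 1, by omega⟩
    simp only [series6go]
    by_cases e1 : n = 1
    · simp [e1]
    by_cases e2 : n = 2
    · simp [e2]
    by_cases e3 : n = 3
    · simp [e3]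
    rw [if_neg e1, if_neg e1, if_neg e2, if_neg e2, if_neg e3, if_neg e3]
    have h4 : 4 ≤ n := by omega
    by_cases hp : primeA n
    · rw [if_pos hp, if_pos hp, ih g (n-1) (by omega) (by omega) (by omega)]
    · rw [if_neg hp, if_neg hp,
          ih g (n-1) (by omega) (by omega) (by omega),
          ih g (n-2) (by omega) (by omega) (by omega),
          ih g (n-3) (by omega) (by omega) (by omega)]

-- A's recurrence at n ≥ 4 in terms of series6 itself
theorem series6_rec (a b c n : Int) (hn : 4 ≤ n) :
    series6 a b c n = if primeA n then n - series6 a b c (n-1)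
      else series6 a b c (n-1) + series6 a b c (n-2) - series6 a b c (n-3) := by
  unfold series6
  obtain ⟨f, hf⟩ : ∃ f, n.toNat = f + 1 := ⟨n.toNat - 1, by omega⟩
  rw [hf]
  simp only [series6go]
  rw [if_neg (by omega), if_neg (by omega), if_neg (by omega),
      series6go_fuel a b c f (n-1).toNat (n-1) (by omega) (by omega) (by omega),
      series6go_fuel a b c f (n-2).toNat (n-2) (by omega) (by omega) (by omega),
      series6go_fuel a b c f (n-3).toNat (n-3) (by omega) (by omega) (by omega)]

-- the loop invariant: after processing 4..n the state is the last three terms of A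
theorem foldl_stepB_inv (a b c n : Int) (hn : 3 ≤ n) :
    (PySem.List.pyRange 4 (n+1) 1).foldl stepB (a, b, c) =
      (series6 a b c (n-2), series6 a b c (n-1), series6 a b c n) := by
  induction n, hn using Int.le_induction with
  | base =>
    rw [PySem.List.pyRange_one_eq_nil (by omega)]
    rfl
  | succ n hn ih =>
    rw [show (n + 1 + 1 : Int) = (n + 1) + 1 from rfl,
        PySem.List.pyRange_one_succ_right (by omega), List.foldl_append, ih]
    simp only [List.foldl, stepB]
    rw [series6_rec a b c (n+1) (by omega), primeA_eq_isPrimeB (n+1) (by omega)]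
    have h1 : n + 1 - 2 = n - 1 := by ring
    have h2 : n + 1 - 1 = n := by ring
    have h3 : n + 1 - 3 = n - 2 := by ring
    rw [h1, h2, h3]

-- ===== VERDICT (by name: the statement is the Claim_ definition above) =====
theorem series6_spec : Claim_equal_series6 := by
  intro a b c n _ hpre
  unfold Spec_series6 series6_alt
  have h1 : Pre_series6 a b c n → 1 ≤ n := fun h => h
  have hn := h1 hpre
  by_cases e1 : n = 1
  · subst e1; simp [series6, series6go]
  · by_cases e2 : n = 2
    · subst e2; simp [series6, series6go]
    · have h3 : 3 ≤ n := by omega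
      rw [if_neg e1, if_neg e2, foldl_stepB_inv a b c n h3]
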